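-- pv_equiv track=rewrite | github.com/clayborg/scripts | ppjson.py | remove_gdb_escapes
-- ===== SOURCE A (Python) =====
-- def remove_gdb_escapes(s):
--     escaped = ''
--     s_len = len(s)
--     idx = 0
--     while idx < s_len:
--         paren_idx = s.find('}', idx)
--         if paren_idx == -1:
--             escaped += s[idx:]
--             break
--         escaped += s[idx:paren_idx]
--         escape_char = '%c' % (ord(s[paren_idx + 1]) ^ 0x20)
--         escaped += escape_char
--         idx = paren_idx + 2
--     return escaped
-- ===== SOURCE B (Python) =====
-- def remove_gdb_escapes(s):
--     out = []
--     i = 0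
--     n = len(s)
--     while i < n:
--         c = s[i]
--         if c == '}':
--             out.append(chr(ord(s[i + 1]) ^ 0x20))
--             i += 2
--         else:
--             out.append(c)
--             i += 1
--     return ''.join(out)
-- ===== Notes on version B (the rewrite author's own statement) =====
-- stated objective: simpler
-- what changed: Replaced find+slice chunk concatenation with a single character-by-character index walk appending to an output list joined once at the end.
-- outside the precondition, e.g. on remove_gdb_escapes('}'): A raises IndexError, B raises IndexError
import Mathlib
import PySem

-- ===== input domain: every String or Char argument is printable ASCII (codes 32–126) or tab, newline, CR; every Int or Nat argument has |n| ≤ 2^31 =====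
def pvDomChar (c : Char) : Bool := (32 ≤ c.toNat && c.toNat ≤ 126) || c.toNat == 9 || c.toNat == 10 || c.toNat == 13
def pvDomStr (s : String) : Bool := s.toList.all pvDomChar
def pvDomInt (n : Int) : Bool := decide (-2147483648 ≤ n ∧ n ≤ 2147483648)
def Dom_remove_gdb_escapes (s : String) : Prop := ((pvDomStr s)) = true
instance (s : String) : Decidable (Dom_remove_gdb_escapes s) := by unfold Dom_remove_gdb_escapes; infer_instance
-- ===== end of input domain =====

-- B replaces A's find+slice chunking with a single character-by-character index walk (simpler decomposition, same result).


-- ===== PORT A =====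
-- A's while loop: find the next '}' from idx, copy the slice before it, append the
-- escaped character (chr(ord(next) ^ 0x20)), continue after it.  Where Python raises
-- IndexError (s[paren_idx+1] past the end) PySem.List.pyGet? is none; that input is
-- excluded by Pre_ and the port stops with the output built so far.
def pvAloop (s : List Char) (idx : Nat) (escaped : List Char) : List Char :=
  if h : idx < s.length then
    if hp : PySem.Chars.findFrom s ['}'] (idx : Int) = -1 then
      escaped ++ PySem.List.slice s (some (idx : Int)) none
    else
      match PySem.List.pyGet? s (((PySem.Chars.findFrom s ['}'] (idx : Int)).toNat : Int) + 1) with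
      | none =>
          escaped ++ PySem.List.slice s (some (idx : Int)) (some (PySem.Chars.findFrom s ['}'] (idx : Int)))
      | some c =>
          pvAloop s ((PySem.Chars.findFrom s ['}'] (idx : Int)).toNat + 2)
            ((escaped ++ PySem.List.slice s (some (idx : Int)) (some (PySem.Chars.findFrom s ['}'] (idx : Int))))
              ++ [Char.ofNat (c.toNat ^^^ 0x20)])
  else escaped
termination_by s.length - idx
decreasing_by
  have hle := (PySem.Chars.findFrom_natCast_spec s ['}'] idx (le_of_lt h) hp).1
  omega

def remove_gdb_escapes (s : String) : String := String.ofList (pvAloop s.toList 0 [])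

-- ===== PORT B =====
-- B's while loop: one pass, one character decision at a time.
def pvBloop (s : List Char) (i : Nat) (out : List Char) : List Char :=
  if h : i < s.length then
    if s[i] = '}' then
      match PySem.List.pyGet? s ((i : Int) + 1) with
      | none => out     -- Python B raises IndexError here (excluded by Pre_)
      | some c => pvBloop s (i + 2) (out ++ [Char.ofNat (c.toNat ^^^ 0x20)])
    else pvBloop s (i + 1) (out ++ [s[i]])
  else out
termination_by s.length - i

def remove_gdb_escapes_alt (s : String) : String := String.ofList (pvBloop s.toList 0 [])

-- ===== PRECONDITION & SPEC =====
-- Pre_ excludes exactly the strings whose trailing run of '}' has odd length: on those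
-- both Python A and Python B raise IndexError (the character after the final '}' is read).
def Pre_remove_gdb_escapes (s : String) : Prop :=
  (s.toList.reverse.takeWhile (fun c => c == '}')).length % 2 = 0
instance (s : String) : Decidable (Pre_remove_gdb_escapes s) := by
  unfold Pre_remove_gdb_escapes; infer_instance

def pvWitness_remove_gdb_escapes : String := "a}b}} x"

def Spec_remove_gdb_escapes (s : String) (out : String) : Prop := out = remove_gdb_escapes_alt s
instance (s : String) (out : String) : Decidable (Spec_remove_gdb_escapes s out) := by unfold Spec_remove_gdb_escapes; infer_instance

-- ===== CLAIM (what is proved, stated in full; the proofs are below) =====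
def Claim_equal_remove_gdb_escapes : Prop := ∀ (s : String), Dom_remove_gdb_escapes s → Pre_remove_gdb_escapes s → Spec_remove_gdb_escapes s (remove_gdb_escapes s)

-- ===== LEMMAS AND PROOFS =====

-- singleton prefix of a drop names the character at that index
lemma pv_prefix_drop_iff (s : List Char) (i : Nat) (h : i < s.length) :
    ['}'] <+: s.drop i ↔ s[i] = '}' := by
  rw [List.drop_eq_getElem_cons h]
  constructor
  · rintro ⟨t, ht⟩
    have hc : '}' :: t = s[i] :: List.drop (i + 1) s := ht
    injection hc with h1 _
    exact h1.symm
  · intro he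
    exact ⟨List.drop (i + 1) s, by rw [he]; rfl⟩

-- B's walk over a block of non-'}' characters copies that block verbatim
lemma pv_walk (s : List Char) (n : Nat) : ∀ (i : Nat) (out : List Char),
    i + n ≤ s.length →
    (∀ k, k < n → ∀ (hk : i + k < s.length), s[i + k] ≠ '}') →
    pvBloop s i out = pvBloop s (i + n) (out ++ (s.drop i).take n) := by
  induction n with
  | zero => intro i out _ _; simp
  | succ n ih =>
    intro i out hle hne
    have hi : i < s.length := by omega
    have h0 : s[i] ≠ '}' := by
      have := hne 0 (by omega) (by omega)
      simpa using this
    rw [pvBloop]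
    rw [dif_pos hi, if_neg h0]
    rw [ih (i + 1) (out ++ [s[i]]) (by omega) (by
      intro k hk hk2
      have := hne (k + 1) (by omega) (by omega)
      simpa [Nat.add_assoc, Nat.add_comm 1 k] using this)]
    have h1 : i + 1 + n = i + (n + 1) := by omega
    rw [h1, List.drop_eq_getElem_cons hi, List.take_succ_cons]
    simp

-- the loops agree from every position, with any accumulator
lemma pv_loops_eq (s : List Char) : ∀ (d idx : Nat) (esc : List Char),
    s.length - idx ≤ d → pvAloop s idx esc = pvBloop s idx esc := by
  intro d
  induction d with
  | zero =>
    intro idx esc hd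
    have h : ¬ idx < s.length := by omega
    rw [pvAloop, pvBloop, dif_neg h, dif_neg h]
  | succ d ih =>
    intro idx esc hd
    by_cases h : idx < s.length
    · rw [pvAloop, dif_pos h]
      by_cases hp : PySem.Chars.findFrom s ['}'] (idx : Int) = -1
      · -- no '}' from idx on: A copies the suffix, B walks it
        rw [dif_pos hp]
        have hmem : ¬ ['}'] <:+: s.drop idx :=
          (PySem.Chars.findFrom_natCast_eq_neg_one_iff s ['}'] idx (le_of_lt h)).mp hp
        have hnomem : '}' ∉ s.drop idx := by
          intro hm
          exact hmem (List.infix_iff_prefix_suffix.mpr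
            (by
              obtain ⟨l1, l2, hsplit⟩ := List.append_of_mem hm
              exact ⟨'}' :: l2, ⟨l2, rfl⟩, by rw [hsplit]; exact ⟨l1, by simp⟩⟩))
        rw [pv_walk s (s.length - idx) idx esc (by omega) (by
          intro k hk hk2 hEq
          exact hnomem (List.mem_iff_getElem.mpr
            ⟨k, by simp; omega, by rw [List.getElem_drop]; exact hEq⟩))]
        rw [pvBloop, dif_neg (by omega : ¬ idx + (s.length - idx) < s.length)]
        rw [PySem.List.slice_from_natCast]
        rw [List.take_of_length_le (by simp)]
      · -- '}' found at p ≥ idx: both escape s[p+1] and continue at p+2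
        rw [dif_neg hp]
        obtain ⟨hge, hpre, hmin⟩ :=
          PySem.Chars.findFrom_natCast_spec s ['}'] idx (le_of_lt h) hp
        set P := PySem.Chars.findFrom s ['}'] (idx : Int) with hP
        have hPnn : 0 ≤ P := le_trans (by exact_mod_cast Int.natCast_nonneg idx) hge
        have hidxle : idx ≤ P.toNat := by omega
        have hPlt : P.toNat < s.length := by
          by_contra hc
          rw [List.drop_eq_nil_of_le (by omega)] at hpre
          exact absurd (List.prefix_nil.mp hpre) (by simp)
        have hPchar : s[P.toNat] = '}' := (pv_prefix_drop_iff s P.toNat hPlt).mp hpre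
        have hPcast : P = ((P.toNat : Nat) : Int) := (Int.toNat_of_nonneg hPnn).symm
        have hslice : PySem.List.slice s (some (idx : Int)) (some P) =
            (s.drop idx).take (P.toNat - idx) := by
          conv_lhs => rw [hPcast]
          rw [PySem.List.slice_natCast]
        rw [pv_walk s (P.toNat - idx) idx esc (by omega) (by
          intro k hk hk2
          intro hEq
          exact hmin (idx + k) (by omega) (by omega)
            ((pv_prefix_drop_iff s (idx + k) hk2).mpr hEq))]
        have harith : idx + (P.toNat - idx) = P.toNat := by omega
        rw [harith]
        rw [pvBloop, dif_pos hPlt, if_pos hPchar]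
        rw [hslice]
        cases hg : PySem.List.pyGet? s ((P.toNat : Int) + 1) with
        | none => rfl
        | some c =>
          exact ih (P.toNat + 2) _ (by omega)
    · rw [pvAloop, pvBloop, dif_neg h, dif_neg h]

-- ===== VERDICT (by name: the statement is the Claim_ definition above) =====
theorem remove_gdb_escapes_spec : Claim_equal_remove_gdb_escapes := by
  intro s _ _
  unfold Spec_remove_gdb_escapes remove_gdb_escapes remove_gdb_escapes_alt
  exact congrArg String.ofList (pv_loops_eq s.toList s.toList.length 0 [] (by omega))
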